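-- pv_equiv track=rewrite | github.com/NeoLoon/Maplestory_Bot_KR_EN | module/simbol.py | simbol3
-- ===== SOURCE A (Python) =====
-- def simbol3(a, b):
--     result1 = 0
--     result2 = 0
--     for i in range(1, a):
--         result1 += 12440000 + (6600000 * i)
--     for i in range(1, b):
--         result2 += 12440000 + (6600000 * i)
--     result = result2 - result1
--     return format(result, ',')
-- ===== SOURCE B (Python) =====
-- def simbol3(a, b):
--     # closed form of sum_{i=1}^{n-1} (12440000 + 6600000*i); 0 when n <= 1
--     def series(n):
--         if n <= 1:
--             return 0
--         return 12440000 * (n - 1) + 3300000 * n * (n - 1)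
--     return format(series(b) - series(a), ',')
-- ===== Notes on version B (the rewrite author's own statement) =====
-- stated objective: faster
-- what changed: Replaces the two O(n) accumulation loops with the closed-form arithmetic-series formula evaluated in O(1).
import Mathlib
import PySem

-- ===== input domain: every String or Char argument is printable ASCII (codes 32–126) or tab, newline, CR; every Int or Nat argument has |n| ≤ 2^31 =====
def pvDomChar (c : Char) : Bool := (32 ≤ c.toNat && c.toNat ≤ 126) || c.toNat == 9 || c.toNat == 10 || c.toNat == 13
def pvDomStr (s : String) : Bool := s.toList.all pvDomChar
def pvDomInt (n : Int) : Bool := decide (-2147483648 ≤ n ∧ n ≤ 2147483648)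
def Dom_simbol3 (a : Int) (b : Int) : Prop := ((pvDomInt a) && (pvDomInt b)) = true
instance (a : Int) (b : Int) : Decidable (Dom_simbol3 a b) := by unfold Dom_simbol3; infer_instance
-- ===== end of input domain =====

-- B replaces A's two accumulation loops by the closed-form arithmetic-series sum (O(1) instead of O(a+b)).

-- shared helper: Python's builtin format(n, ',') — decimal digits grouped in threes from the right
def pvGroup3 : List Char → List Char
  | [] => []
  | ds =>
    if _h : ds.length ≤ 3 then ds
    else ds.take 3 ++ ',' :: pvGroup3 (ds.drop 3)
  decreasing_by simp_all; omega

def pvCommaFmt (n : Int) : String :=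
  let g := (pvGroup3 (PySem.Int.toChars (n.natAbs : Int)).reverse).reverse
  String.ofList (if n < 0 then '-' :: g else g)

-- ===== PORT A =====
def simbol3 (a : Int) (b : Int) : String :=
  let result1 := (PySem.List.pyRange 1 a 1).foldl (fun r i => r + (12440000 + 6600000 * i)) 0
  let result2 := (PySem.List.pyRange 1 b 1).foldl (fun r i => r + (12440000 + 6600000 * i)) 0
  let result := result2 - result1
  pvCommaFmt result

-- ===== PORT B =====
def pvSeries (n : Int) : Int :=
  if n ≤ 1 then 0 else 12440000 * (n - 1) + 3300000 * n * (n - 1)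

def simbol3_alt (a : Int) (b : Int) : String :=
  pvCommaFmt (pvSeries b - pvSeries a)

-- ===== PRECONDITION & SPEC =====
def Spec_simbol3 (a : Int) (b : Int) (out : String) : Prop := out = simbol3_alt a b
instance (a : Int) (b : Int) (out : String) : Decidable (Spec_simbol3 a b out) := by unfold Spec_simbol3; infer_instance

-- ===== CLAIM (what is proved, stated in full; the proofs are below) =====
def Claim_equal_simbol3 : Prop := ∀ (a : Int) (b : Int), Dom_simbol3 a b → Spec_simbol3 a b (simbol3 a b)

-- ===== LEMMAS AND PROOFS =====

-- ===== VERDICT (by name: the statement is the Claim_ definition above) =====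
lemma pv_sum_range (m : Nat) :
    ((List.range m).map ((fun i => (12440000 : Int) + 6600000 * i) ∘ fun k : Nat => 1 + (k : Int))).sum
      = 12440000 * m + 3300000 * m * (m + 1) := by
  induction m with
  | zero => simp
  | succ m ih =>
    rw [List.range_succ, List.map_append, List.sum_append, ih]
    simp [Function.comp]
    ring

lemma pv_loop_eq (n : Int) :
    (PySem.List.pyRange 1 n 1).foldl (fun r i => r + (12440000 + 6600000 * i)) 0 = pvSeries n := by
  rw [PySem.List.pyRange_one]
  have h : ∀ (l : List Int) (init : Int),
      l.foldl (fun r i => r + (12440000 + 6600000 * i)) init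
        = init + (l.map (fun i => (12440000 : Int) + 6600000 * i)).sum := by
    intro l
    induction l with
    | nil => simp
    | cons x xs ih => intro init; simp [List.foldl_cons, ih]; ring
  rw [h, List.map_map, pv_sum_range (n - 1).toNat]
  by_cases hn : n ≤ 1
  · have : (n - 1).toNat = 0 := by omega
    simp [this, pvSeries, hn]
  · have hm : ((n - 1).toNat : Int) = n - 1 := by omega
    rw [hm]
    simp [pvSeries, hn]
    ring

theorem simbol3_spec : Claim_equal_simbol3 := by
  intro a b _
  show simbol3 a b = simbol3_alt a b
  simp only [simbol3, simbol3_alt, pv_loop_eq]
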